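-- pv_equiv track=rewrite | github.com/CSStudySession/AlgoInPython | Pins/Pins update experiment ranges.py | update_buckets
-- ===== SOURCE A (Python) =====
-- def update_buckets(bucket_map, target_size): # part 2
--     free_set = set(range(1000))  # 所有可能的 bucket 值
--     group_count = {}
--     # 移除当前被占用的bucket 并记录每组大小
--     for group, buckets in bucket_map.items():
--         group_count[group] = len(buckets)
--         for b in buckets:
--             free_set.discard(b)
--     free_list = list(free_set)
--     # 如果需要顺序: free_list = sorted(free_set)
--     freed_list = []
--     # 从缩小的实验组中释放多余的 bucket
--     for group, tgt in target_size.items(): # tgt:target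
--         diff = group_count[group] - tgt  # 缩小值
--         while diff > 0:
--             freed_list.append(bucket_map[group].pop())
--             diff -= 1
--         group_count[group] = tgt # 更新为shrink后的值
--     # 给增长的实验组分配bucket 优先使用未分配的 其次用已释放的
--     idx_free, idx_freed = 0, 0
--     for group, tgt in target_size.items(): # tgt:target
--         need = tgt - len(bucket_map[group]) # target number - 目前有的 = 还需要多少
--         while need > 0:
--             if free_list and idx_free < len(free_list):
--                 bucket_map[group].append(free_list[idx_free])
--                 idx_free += 1
--             elif freed_list:
--                 bucket_map[group].append(freed_list[idx_freed])
--                 idx_freed += 1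
--             else:
--                 raise Exception("Not enough buckets available")
--             need -= 1
--     return bucket_map
-- ===== SOURCE B (Python) =====
-- def update_buckets(bucket_map, target_size):
--     occupied = {b for buckets in bucket_map.values() for b in buckets}
--     free_list = [i for i in range(1000) if i not in occupied]
--     kept = {}
--     freed_list = []
--     for group, tgt in target_size.items():
--         cur = bucket_map[group]
--         kept[group] = cur[:tgt]
--         freed_list.extend(reversed(cur[tgt:]))
--     pool = iter(free_list + freed_list)
--     for group, tgt in target_size.items():
--         cur = kept[group]
--         for _ in range(tgt - len(cur)):
--             try:
--                 cur.append(next(pool))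
--             except StopIteration:
--                 raise Exception("Not enough buckets available")
--         bucket_map[group] = cur
--     return bucket_map
-- ===== Notes on version B (the rewrite author's own statement) =====
-- stated objective: simpler
-- what changed: B replaces A's three while-loop/cursor phases by slice-based shrinking (kept prefix + reversed tail per group) and a single sequential pool free_list+freed_list consumed by an iterator, instead of per-bucket pop() calls and two manual index cursors.
import Mathlib
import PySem

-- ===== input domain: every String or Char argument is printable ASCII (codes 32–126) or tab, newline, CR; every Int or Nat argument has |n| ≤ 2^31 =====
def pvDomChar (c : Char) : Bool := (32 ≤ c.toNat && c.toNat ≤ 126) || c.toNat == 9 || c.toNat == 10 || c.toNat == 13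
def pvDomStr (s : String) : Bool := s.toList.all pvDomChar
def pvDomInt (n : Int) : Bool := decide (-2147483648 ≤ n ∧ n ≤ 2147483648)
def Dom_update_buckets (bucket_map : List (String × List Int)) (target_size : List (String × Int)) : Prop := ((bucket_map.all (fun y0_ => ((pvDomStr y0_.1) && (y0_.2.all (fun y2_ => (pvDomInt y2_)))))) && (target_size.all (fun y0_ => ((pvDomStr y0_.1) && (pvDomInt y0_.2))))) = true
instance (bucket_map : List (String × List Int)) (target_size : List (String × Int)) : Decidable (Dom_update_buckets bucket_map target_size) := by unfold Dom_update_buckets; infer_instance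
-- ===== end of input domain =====

-- B replaces A's three cursor/while-loop phases by slice-based shrinking and a single sequential
-- pool of spare buckets (objective: alternative decomposition, same cost). Both Pythons mutate the
-- bucket_map dict in place and return it; the equivalence proved here is about the RETURN value.

-- ===== PORT A =====
-- while diff > 0: freed_list.append(bucket_map[group].pop()); diff -= 1
-- (.pop() on an empty list raises IndexError in Python; that branch is excluded by Pre_)
def pvPopLoop (buckets freed : List Int) (diff : Int) : List Int × List Int :=
  if 0 < diff then
    match buckets.getLast? with
    | some b => pvPopLoop buckets.dropLast (freed ++ [b]) (diff - 1)
    | none => (buckets, freed)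
  else (buckets, freed)
termination_by diff.toNat
decreasing_by omega

-- the inner while-loop of the growth phase; freed_list[idx_freed] out of range (IndexError) and the
-- 'raise Exception("Not enough buckets available")' branch are both excluded by Pre_
def pvGrowLoop (free_list freed_list : List Int) (g : String)
    (bm : PySem.Dict String (List Int)) (idxf idxd need : Int) :
    PySem.Dict String (List Int) × Int × Int :=
  if 0 < need then
    if free_list ≠ [] ∧ idxf < (free_list.length : Int) then
      pvGrowLoop free_list freed_list g
        (bm.insert g (bm.getD g [] ++ [PySem.List.pyGetD free_list idxf 0])) (idxf + 1) idxd (need - 1)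
    else if freed_list ≠ [] then
      pvGrowLoop free_list freed_list g
        (bm.insert g (bm.getD g [] ++ [PySem.List.pyGetD freed_list idxd 0])) idxf (idxd + 1) (need - 1)
    else (bm, idxf, idxd)
  else (bm, idxf, idxd)
termination_by need.toNat
decreasing_by all_goals omega

-- list(free_set): for set(range(1000)) with discards CPython's iteration order is ascending
-- (each small int sits in its own hash slot), which is exactly insertion order of PySem.Set here.
-- dict lookups bucket_map[group] / group_count[group] use getD; the KeyError case is excluded by Pre_.
def update_buckets (bucket_map : List (String × List Int)) (target_size : List (String × Int)) :
    List (String × List Int) :=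
  let init : PySem.Set Int := PySem.Set.ofList ((List.range 1000).map Int.ofNat)
  let st1 := bucket_map.foldl
    (fun (st : PySem.Dict String Int × PySem.Set Int) p =>
      (st.1.insert p.1 (p.2.length : Int), p.2.foldl (fun s b => PySem.Set.discard s b) st.2))
    (PySem.Dict.empty, init)
  let group_count := st1.1
  let free_list : List Int := st1.2
  let st2 := target_size.foldl
    (fun (st : PySem.Dict String (List Int) × PySem.Dict String Int × List Int) p =>
      let diff := st.2.1.getD p.1 0 - p.2
      let r := pvPopLoop (st.1.getD p.1 []) st.2.2 diff
      (st.1.insert p.1 r.1, st.2.1.insert p.1 p.2, r.2))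
    (PySem.Dict.mk bucket_map, group_count, [])
  let bm2 := st2.1
  let freed_list := st2.2.2
  let st3 := target_size.foldl
    (fun (st : PySem.Dict String (List Int) × Int × Int) p =>
      let need := p.2 - ((st.1.getD p.1 []).length : Int)
      pvGrowLoop free_list freed_list p.1 st.1 st.2.1 st.2.2 need)
    (bm2, 0, 0)
  st3.1.items

-- ===== PORT B =====
-- one pass computes kept prefixes (slices) and the freed pool; growth pulls from a single
-- sequential pool free_list ++ freed_list (take/drop = the iterator; exhaustion excluded by Pre_)
def update_buckets_alt (bucket_map : List (String × List Int)) (target_size : List (String × Int)) :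
    List (String × List Int) :=
  let occupied : PySem.Set Int :=
    PySem.Set.ofList (bucket_map.foldl (fun acc p => acc ++ p.2) [])
  let free_list : List Int :=
    ((List.range 1000).map Int.ofNat).filter (fun i => !(PySem.Set.contains occupied i))
  let bm : PySem.Dict String (List Int) := PySem.Dict.mk bucket_map
  let st := target_size.foldl
    (fun (st : PySem.Dict String (List Int) × List Int) p =>
      let cur := bm.getD p.1 []
      (st.1.insert p.1 (PySem.List.slice cur none (some p.2)),
       st.2 ++ (PySem.List.slice cur (some p.2) none).reverse))
    (PySem.Dict.empty, [])
  let kept := st.1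
  let st2 := target_size.foldl
    (fun (st : PySem.Dict String (List Int) × List Int) p =>
      let cur := kept.getD p.1 []
      let n := (p.2 - (cur.length : Int)).toNat
      (st.1.insert p.1 (cur ++ st.2.take n), st.2.drop n))
    (bm, free_list ++ st.2)
  st2.1.items

-- ===== PRECONDITION & SPEC =====
-- input-shape helpers for Pre_ (closed-form reads of the input, no port code)
def pvOrig (bucket_map : List (String × List Int)) (g : String) : List Int :=
  (PySem.Dict.mk bucket_map).getD g []
-- number of values in range(1000) not occupied by any bucket (arithmetic form, cheap to decide)
def pvFreeLen (bucket_map : List (String × List Int)) : Nat :=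
  1000 - ((PySem.List.dedup (bucket_map.flatMap Prod.snd)).filter
    (fun i => decide (0 ≤ i) && decide (i < 1000))).length
def pvNeed (bucket_map : List (String × List Int)) (p : String × Int) : Nat :=
  (p.2 - (((pvOrig bucket_map p.1).take p.2.toNat).length : Int)).toNat
def pvFreedCnt (bucket_map : List (String × List Int)) (p : String × Int) : Nat :=
  ((pvOrig bucket_map p.1).drop p.2.toNat).length

-- Pre_ excludes exactly: duplicate keys in either association list (a Python dict cannot carry
-- them, so list-level behaviour there is a representation accident), target groups missing from
-- bucket_map (KeyError), negative targets (IndexError from .pop() on an empty list), and targets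
-- whose total growth exceeds the free plus freed buckets (Exception/IndexError on exhaustion).
def Pre_update_buckets (bucket_map : List (String × List Int)) (target_size : List (String × Int)) : Prop :=
  (bucket_map.map Prod.fst).Nodup ∧ (target_size.map Prod.fst).Nodup ∧
  (∀ p ∈ target_size, p.1 ∈ bucket_map.map Prod.fst ∧ 0 ≤ p.2) ∧
  (target_size.map (pvNeed bucket_map)).sum ≤
    pvFreeLen bucket_map + (target_size.map (pvFreedCnt bucket_map)).sum
instance (bucket_map : List (String × List Int)) (target_size : List (String × Int)) :
    Decidable (Pre_update_buckets bucket_map target_size) := by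
  unfold Pre_update_buckets; infer_instance

def pvWitness_update_buckets : (List (String × List Int)) × (List (String × Int)) :=
  ([("a", [1, 2]), ("b", [])], [("a", 1), ("b", 2)])

def Spec_update_buckets (bucket_map : List (String × List Int)) (target_size : List (String × Int))
    (out : List (String × List Int)) : Prop := out = update_buckets_alt bucket_map target_size
instance (bucket_map : List (String × List Int)) (target_size : List (String × Int))
    (out : List (String × List Int)) : Decidable (Spec_update_buckets bucket_map target_size out) := by
  unfold Spec_update_buckets; infer_instance

-- ===== CLAIM (what is proved, stated in full; the proofs are below) =====
def Claim_equal_update_buckets : Prop := ∀ (bucket_map : List (String × List Int)) (target_size : List (String × Int)), Dom_update_buckets bucket_map target_size → Pre_update_buckets bucket_map target_size → Spec_update_buckets bucket_map target_size (update_buckets bucket_map target_size)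

-- ===== LEMMAS AND PROOFS =====

-- dict toolbox ------------------------------------------------------------

theorem pv_insert_pos {ν : Type} (d : PySem.Dict String ν) (k : String) (v : ν)
    (h : d.contains k = true) :
    d.insert k v = PySem.Dict.mk (d.items.map (fun p => if p.1 == k then (k, v) else p)) := by
  unfold PySem.Dict.insert; rw [if_pos h]

theorem pv_insert_neg {ν : Type} (d : PySem.Dict String ν) (k : String) (v : ν)
    (h : ¬ d.contains k = true) :
    d.insert k v = PySem.Dict.mk (d.items ++ [(k, v)]) := by
  unfold PySem.Dict.insert; rw [if_neg h]

theorem pv_any_map_key {ν : Type} (l : List (String × ν)) (a b : String) (v : ν) :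
    ((l.map (fun p => if p.1 == a then (a, v) else p)).any (fun p => p.1 == b)) =
      l.any (fun p => p.1 == b) := by
  simp only [List.any_map]
  congr 1
  funext p
  by_cases h : p.1 = a
  · simp [Function.comp, h]
  · simp [Function.comp, h]

theorem pv_map_id_of_no_key {ν : Type} (items : List (String × ν)) (k : String) (w : ν)
    (h : (items.any fun p => p.1 == k) = false) :
    List.map (fun p => if (p.1 == k) = true then (k, w) else p) items = items := by
  conv_rhs => rw [← List.map_id items]
  apply List.map_congr_left
  intro p hp
  have h3 : (p.1 == k) = false := by simpa using List.any_eq_false.mp h p hp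
  simp [h3]

theorem pv_insert_insert {ν : Type} (d : PySem.Dict String ν) (k : String) (v w : ν) :
    (d.insert k v).insert k w = d.insert k w := by
  unfold PySem.Dict.insert PySem.Dict.contains
  by_cases h : d.items.any (fun p => p.1 == k) = true
  · simp only [h, if_pos]
    have h2 : (List.map (fun p => if (p.1 == k) = true then (k, v) else p) d.items).any
        (fun p => p.1 == k) = true := by
      rcases List.any_eq_true.mp h with ⟨p, hp, hpk⟩
      exact List.any_eq_true.mpr ⟨(k, v), List.mem_map.mpr ⟨p, hp, by simp [hpk]⟩, by simp⟩
    simp only [h2, if_pos, List.map_map, PySem.Dict.mk.injEq]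
    apply List.map_congr_left
    intro p _
    by_cases hpk : p.1 = k <;> simp [hpk]
  · have h2 : ((d.items ++ [(k, v)]).any (fun p => p.1 == k)) = true := by simp
    simp only [h, if_neg, Bool.false_eq_true, not_false_iff, h2, if_pos, PySem.Dict.mk.injEq]
    simp only [Bool.not_eq_true] at h
    simp only [List.map_append, List.map_cons, List.map_nil, beq_self_eq_true, if_pos]
    rw [pv_map_id_of_no_key d.items k w h]

theorem pv_find?_key {ν : Type} : ∀ (l : List (String × ν)), (l.map Prod.fst).Nodup →
    ∀ {p : String × ν}, p ∈ l → l.find? (fun q => q.1 == p.1) = some p := by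
  intro l
  induction l with
  | nil => intro _ p hp; simp at hp
  | cons q rest ih =>
    intro hnd p hp
    simp only [List.map_cons, List.nodup_cons] at hnd
    rcases List.mem_cons.mp hp with rfl | hp'
    · simp
    · have hne : (q.1 == p.1) = false := by
        have : p.1 ∈ rest.map Prod.fst := List.mem_map.mpr ⟨p, hp', rfl⟩
        simp only [beq_eq_false_iff_ne, ne_eq]
        intro h; exact hnd.1 (h ▸ this)
      simp only [List.find?_cons, hne]
      exact ih hnd.2 hp'

-- re-inserting the value a key already (uniquely) holds is a no-op
theorem pv_insert_self {ν : Type} (d : PySem.Dict String ν) (k : String) (x : ν)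
    (hnd : d.keys.Nodup) (hc : d.contains k = true) :
    d.insert k (d.getD k x) = d := by
  unfold PySem.Dict.insert
  simp only [hc, if_pos]
  rcases List.any_eq_true.mp hc with ⟨p, hp, hpk⟩
  have hk : p.1 = k := by simpa using hpk
  subst hk
  have hfind : d.items.find? (fun q => q.1 == p.1) = some p := pv_find?_key d.items hnd hp
  have hget : d.getD p.1 x = p.2 := by
    unfold PySem.Dict.getD PySem.Dict.get?
    rw [hfind]; rfl
  rw [hget]
  cases d with
  | mk items =>
    simp only [PySem.Dict.mk.injEq]
    conv_rhs => rw [← List.map_id items]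
    apply List.map_congr_left
    intro q hq
    by_cases hqk : q.1 = p.1
    · have : q = p := by
        have h5 := pv_find?_key (ν := ν) items hnd hq
        rw [hqk] at h5
        rw [h5] at hfind
        exact (Option.some.injEq _ _).mp hfind
      simp [this]
    · simp [hqk]

-- inserts at different keys commute when at least one key is already present
theorem pv_insert_comm {ν : Type} (d : PySem.Dict String ν) (a b : String) (v w : ν)
    (hab : a ≠ b) (hc : d.contains a = true ∨ d.contains b = true) :
    (d.insert a v).insert b w = (d.insert b w).insert a v := by
  have hba : ((b : String) == a) = false := beq_eq_false_iff_ne.mpr (Ne.symm hab)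
  have hab' : ((a : String) == b) = false := beq_eq_false_iff_ne.mpr hab
  have hmap : ∀ (l : List (String × ν)),
      List.map (fun p => if (p.1 == b) = true then (b, w) else p)
        (List.map (fun p => if (p.1 == a) = true then (a, v) else p) l) =
      List.map (fun p => if (p.1 == a) = true then (a, v) else p)
        (List.map (fun p => if (p.1 == b) = true then (b, w) else p) l) := by
    intro l
    simp only [List.map_map]
    apply List.map_congr_left
    intro p _
    by_cases h1 : p.1 = a <;> by_cases h2 : p.1 = b <;>
      simp [Function.comp, h1, h2, hab, Ne.symm hab]
  by_cases ha : d.contains a = true <;> by_cases hb : d.contains b = true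
  · have hb1 : (PySem.Dict.mk (d.items.map (fun p => if p.1 == a then (a, v) else p))).contains b = true := by
      unfold PySem.Dict.contains; rw [pv_any_map_key]; exact hb
    have ha1 : (PySem.Dict.mk (d.items.map (fun p => if p.1 == b then (b, w) else p))).contains a = true := by
      unfold PySem.Dict.contains; rw [pv_any_map_key]; exact ha
    rw [pv_insert_pos d a v ha, pv_insert_pos d b w hb, pv_insert_pos _ b w hb1,
        pv_insert_pos _ a v ha1]
    exact congrArg PySem.Dict.mk (hmap d.items)
  · have hb1 : ¬ (PySem.Dict.mk (d.items.map (fun p => if p.1 == a then (a, v) else p))).contains b = true := by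
      unfold PySem.Dict.contains; rw [pv_any_map_key]; exact hb
    have ha1 : (PySem.Dict.mk (d.items ++ [(b, w)])).contains a = true := by
      unfold PySem.Dict.contains at ha ⊢; simp [ha]
    rw [pv_insert_pos d a v ha, pv_insert_neg d b w hb, pv_insert_neg _ b w hb1,
        pv_insert_pos _ a v ha1]
    simp only [List.map_append, List.map_cons, List.map_nil, PySem.Dict.mk.injEq, hba]
    simp
  · have hb1 : (PySem.Dict.mk (d.items ++ [(a, v)])).contains b = true := by
      unfold PySem.Dict.contains at hb ⊢; simp [hb]
    have ha1 : ¬ (PySem.Dict.mk (d.items.map (fun p => if p.1 == b then (b, w) else p))).contains a = true := by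
      unfold PySem.Dict.contains; rw [pv_any_map_key]; exact ha
    rw [pv_insert_neg d a v ha, pv_insert_pos d b w hb, pv_insert_pos _ b w hb1,
        pv_insert_neg _ a v ha1]
    simp only [List.map_append, List.map_cons, List.map_nil, PySem.Dict.mk.injEq, hab']
    simp
  · rcases hc with h | h
    · exact absurd h ha
    · exact absurd h hb

-- a pending insert at a key the fold does not touch commutes through an insert-fold
theorem pv_insert_foldl_comm {β ν : Type} (f : String × β → ν) :
    ∀ (ts : List (String × β)) (d : PySem.Dict String ν) (k : String) (w : ν),
    k ∉ ts.map Prod.fst → d.contains k = true →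
    (ts.foldl (fun m p => m.insert p.1 (f p)) d).insert k w =
      ts.foldl (fun m p => m.insert p.1 (f p)) (d.insert k w) := by
  intro ts
  induction ts with
  | nil => intro d k w _ _; rfl
  | cons p rest ih =>
    intro d k w hk hc
    simp only [List.map_cons, List.mem_cons, not_or] at hk
    simp only [List.foldl_cons]
    rw [ih (d.insert p.1 (f p)) k w hk.2
        (by rw [PySem.Dict.contains_insert]; simp [hc]),
      pv_insert_comm d p.1 k (f p) w (fun h => hk.1 h.symm) (Or.inr hc)]

theorem pv_contains_foldl {β ν : Type} (f : String × β → ν) :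
    ∀ (ts : List (String × β)) (d : PySem.Dict String ν) (k : String),
    d.contains k = true → (ts.foldl (fun m p => m.insert p.1 (f p)) d).contains k = true := by
  intro ts
  induction ts with
  | nil => intro d k h; exact h
  | cons p rest ih =>
    intro d k h
    simp only [List.foldl_cons]
    exact ih _ k (by rw [PySem.Dict.contains_insert]; simp [h])

theorem pv_nodup_keys_foldl {β ν : Type} (f : String × β → ν) :
    ∀ (ts : List (String × β)) (d : PySem.Dict String ν),
    d.keys.Nodup → (ts.foldl (fun m p => m.insert p.1 (f p)) d).keys.Nodup := by
  intro ts
  induction ts with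
  | nil => intro d h; exact h
  | cons p rest ih =>
    intro d h
    exact ih _ (PySem.Dict.nodup_keys_insert d p.1 (f p) h)

-- looking a key up after an insert-fold with nodup keys = first match in the update list
theorem pv_foldl_insert_getD {β ν : Type} (f : String × β → ν) :
    ∀ (ts : List (String × β)) (d : PySem.Dict String ν) (g : String) (c : ν),
    (ts.map Prod.fst).Nodup →
    (ts.foldl (fun m p => m.insert p.1 (f p)) d).getD g c =
      (match ts.find? (fun p => p.1 == g) with | some p => f p | none => d.getD g c) := by
  intro ts
  induction ts with
  | nil => intro d g c _; simp
  | cons p rest ih =>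
    intro d g c hnd
    simp only [List.map_cons, List.nodup_cons] at hnd
    by_cases hpg : p.1 = g
    · have hfind : rest.find? (fun q => q.1 == g) = none := by
        apply List.find?_eq_none.mpr
        intro x hx hbx
        have : x.1 = g := by simpa using hbx
        exact hnd.1 (by rw [hpg]; exact List.mem_map.mpr ⟨x, hx, this⟩)
      simp only [List.foldl_cons, List.find?_cons, hpg, beq_self_eq_true]
      rw [ih _ g c hnd.2, hfind, ← hpg, PySem.Dict.getD_insert_self]
    · have hb : (p.1 == g) = false := beq_eq_false_iff_ne.mpr hpg
      simp only [List.foldl_cons, List.find?_cons, hb]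
      rw [ih _ g c hnd.2]
      cases hf : rest.find? (fun q => q.1 == g) with
      | some q => simp
      | none => simp only [PySem.Dict.getD_insert_of_ne d (f p) c (Ne.symm hpg)]

-- sets ---------------------------------------------------------------------

theorem pv_ofList_nodup {α : Type} [BEq α] [LawfulBEq α] :
    ∀ (l : List α) (acc : List α), (acc ++ l).Nodup → l.foldl PySem.Set.add acc = acc ++ l := by
  intro l
  induction l with
  | nil => intro acc _; simp
  | cons x rest ih =>
    intro acc h
    have hx : x ∉ acc := by
      rcases List.nodup_append.mp h with ⟨_, _, hdisj⟩
      exact fun hmem => hdisj x hmem x (by simp) rfl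
    have hc : PySem.Set.contains acc x = false := by
      simp [PySem.Set.contains, List.contains_eq_mem, hx]
    simp only [List.foldl_cons, PySem.Set.add, hc, Bool.false_eq_true, if_neg, not_false_iff]
    rw [ih (acc ++ [x]) (by simpa using h)]
    simp

theorem pv_contains_ofList {α : Type} [BEq α] [LawfulBEq α] (l : List α) (x : α) :
    List.contains (PySem.Set.ofList l) x = List.contains l x := by
  by_cases h : x ∈ l
  · simp [List.contains_eq_mem, h, (PySem.Set.mem_ofList l x).mpr h]
  · have : x ∉ (PySem.Set.ofList l : List α) := fun hh => h ((PySem.Set.mem_ofList l x).mp hh)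
    simp [List.contains_eq_mem, h, this]

theorem pv_discard_foldl : ∀ (l s : List Int),
    l.foldl (fun s b => PySem.Set.discard s b) s = s.filter (fun x => !(l.contains x)) := by
  intro l
  induction l with
  | nil => intro s; simp
  | cons b rest ih =>
    intro s
    simp only [List.foldl_cons]
    rw [ih]
    simp only [PySem.Set.discard, List.filter_filter]
    apply List.filter_congr
    intro x _
    simp only [List.contains_cons, Bool.not_or]
    cases h1 : x == b <;> cases h2 : rest.contains x <;>
      simp_all [BEq.comm]

-- phase 1 of A: counting loop + discard loop over the whole dict -----------

theorem pv_phase1 : ∀ (bm : List (String × List Int)) (gc : PySem.Dict String Int) (s : PySem.Set Int),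
    bm.foldl (fun (st : PySem.Dict String Int × PySem.Set Int) p =>
        (st.1.insert p.1 (p.2.length : Int), p.2.foldl (fun s b => PySem.Set.discard s b) st.2))
      (gc, s)
    = (bm.foldl (fun g p => g.insert p.1 (p.2.length : Int)) gc,
       (s : List Int).filter (fun x => !((bm.flatMap Prod.snd).contains x))) := by
  intro bm
  induction bm with
  | nil => intro gc s; simp
  | cons p rest ih =>
    intro gc s
    simp only [List.foldl_cons]
    rw [ih, pv_discard_foldl]
    simp only [List.flatMap_cons, List.filter_filter, Prod.mk.injEq, true_and]
    apply List.filter_congr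
    intro x _
    simp only [List.contains_append, Bool.not_or]
    cases h1 : p.2.contains x <;> cases h2 : (rest.flatMap Prod.snd).contains x <;> simp_all

-- the pop-loop of the shrink phase ----------------------------------------

theorem pv_popLoop_spec : ∀ (bs : List Int) (freed : List Int) (t : Nat),
    pvPopLoop bs freed ((bs.length : Int) - (t : Int)) =
      (bs.take t, freed ++ (bs.drop t).reverse) := by
  intro bs
  induction bs using List.reverseRecOn with
  | nil =>
    intro freed t
    rw [pvPopLoop]
    simp only [List.length_nil, Nat.cast_zero, zero_sub]
    rw [if_neg (by omega)]
    simp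
  | append_singleton ys a ih =>
    intro freed t
    rw [pvPopLoop]
    by_cases ht : t ≤ ys.length
    · rw [if_pos (by simp; omega)]
      simp only [List.getLast?_concat, List.dropLast_concat]
      have harg : ((ys ++ [a]).length : Int) - (t : Int) - 1 = ((ys.length : Int) - (t : Int)) := by
        simp; omega
      rw [harg, ih]
      rw [List.take_append_of_le_length ht, List.drop_append_of_le_length ht]
      simp
    · rw [if_neg (by simp; omega)]
      rw [List.take_of_length_le (by simp; omega), List.drop_eq_nil_of_le (by simp; omega)]
      simp

-- the shrink fold of A -----------------------------------------------------

theorem pv_shrink_spec (bm0 : List (String × List Int)) :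
    ∀ (ts : List (String × Int)) (d : PySem.Dict String (List Int))
      (gc : PySem.Dict String Int) (freed : List Int),
    (ts.map Prod.fst).Nodup →
    (∀ p ∈ ts, d.getD p.1 [] = pvOrig bm0 p.1 ∧
        gc.getD p.1 0 = ((pvOrig bm0 p.1).length : Int) ∧ 0 ≤ p.2) →
    ts.foldl (fun (st : PySem.Dict String (List Int) × PySem.Dict String Int × List Int) p =>
        (st.1.insert p.1 (pvPopLoop (st.1.getD p.1 []) st.2.2 (st.2.1.getD p.1 0 - p.2)).1,
         st.2.1.insert p.1 p.2,
         (pvPopLoop (st.1.getD p.1 []) st.2.2 (st.2.1.getD p.1 0 - p.2)).2)) (d, gc, freed)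
      = (ts.foldl (fun m p => m.insert p.1 ((pvOrig bm0 p.1).take p.2.toNat)) d,
         ts.foldl (fun g p => g.insert p.1 p.2) gc,
         freed ++ ts.flatMap (fun p => ((pvOrig bm0 p.1).drop p.2.toNat).reverse)) := by
  intro ts
  induction ts with
  | nil => intro d gc freed _ _; simp
  | cons p rest ih =>
    intro d gc freed hnd hv
    simp only [List.map_cons, List.nodup_cons] at hnd
    obtain ⟨hd1, hgc1, hp2⟩ := hv p (by simp)
    simp only [List.foldl_cons]
    have hdiff : gc.getD p.1 0 - p.2 = ((pvOrig bm0 p.1).length : Int) - ((p.2.toNat : Nat) : Int) := by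
      rw [hgc1, Int.toNat_of_nonneg hp2]
    rw [hdiff, hd1, pv_popLoop_spec]
    rw [ih _ _ _ hnd.2 ?hrest]
    case hrest =>
      intro q hq
      obtain ⟨hq1, hq2, hq3⟩ := hv q (by simp [hq])
      have hne : q.1 ≠ p.1 := by
        intro h; exact hnd.1 (h ▸ List.mem_map.mpr ⟨q, hq, rfl⟩)
      refine ⟨?_, ?_, hq3⟩
      · rw [PySem.Dict.getD_insert_of_ne _ _ _ hne, hq1]
      · rw [PySem.Dict.getD_insert_of_ne _ _ _ hne, hq2]
    simp [List.flatMap_cons]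

-- the grow while-loop of A -------------------------------------------------

theorem pv_growLoop_spec (free freed : List Int) (g : String) :
    ∀ (n : Nat) (bm : PySem.Dict String (List Int)) (c : Nat) (idxf idxd : Int),
    idxf = ((min c free.length : Nat) : Int) →
    idxd = ((c - min c free.length : Nat) : Int) →
    c + n ≤ free.length + freed.length →
    bm.contains g = true → bm.keys.Nodup →
    pvGrowLoop free freed g bm idxf idxd (n : Int)
      = (bm.insert g (bm.getD g [] ++ ((free ++ freed).drop c).take n),
         ((min (c + n) free.length : Nat) : Int),
         ((c + n - min (c + n) free.length : Nat) : Int)) := by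
  intro n
  induction n with
  | zero =>
    intro bm c idxf idxd hf hd hcap hc hnd
    rw [pvGrowLoop, if_neg (by omega)]
    simp only [List.take_zero, List.append_nil, Nat.add_zero]
    rw [pv_insert_self bm g [] hnd hc, hf, hd]
  | succ m ih =>
    intro bm c idxf idxd hf hd hcap hc hnd
    have hpos : (0 : Int) < ((m + 1 : Nat) : Int) := by omega
    rw [pvGrowLoop, if_pos hpos]
    by_cases hlt : c < free.length
    · have hmin : min c free.length = c := Nat.min_eq_left (Nat.le_of_lt hlt)
      have hcond : free ≠ [] ∧ idxf < (free.length : Int) := by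
        constructor
        · intro hnil; rw [hnil] at hlt; simp at hlt
        · rw [hf, hmin]; omega
      rw [if_pos hcond]
      have hel : PySem.List.pyGetD free idxf 0 = free[c]'hlt := by
        rw [hf, hmin, PySem.List.pyGetD_natCast, List.getD_eq_getElem _ _ hlt]
      have harg1 : idxf + 1 = ((min (c + 1) free.length : Nat) : Int) := by
        rw [hf, hmin, Nat.min_eq_left (by omega)]; omega
      have harg2 : idxd = (((c + 1) - min (c + 1) free.length : Nat) : Int) := by
        rw [hd, hmin, Nat.min_eq_left (by omega)]; omega
      have harg3 : ((m + 1 : Nat) : Int) - 1 = ((m : Nat) : Int) := by omega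
      rw [hel, harg3, ih _ (c + 1) _ _ harg1 harg2 (by omega)
          (by rw [PySem.Dict.contains_insert]; simp)
          (PySem.Dict.nodup_keys_insert _ _ _ hnd)]
      rw [PySem.Dict.getD_insert_self, pv_insert_insert]
      have hdrop : (free ++ freed).drop c = free[c]'hlt :: (free ++ freed).drop (c + 1) := by
        have hlt2 : c < (free ++ freed).length := by simp; omega
        rw [← List.getElem_cons_drop hlt2]
        congr 1
        exact List.getElem_append_left hlt
      rw [hdrop]
      simp only [List.take_succ_cons, List.append_assoc, List.singleton_append,
        Prod.mk.injEq, true_and]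
      constructor <;> · congr 1; omega
    · have hge : free.length ≤ c := Nat.le_of_not_lt hlt
      have hmin : min c free.length = free.length := Nat.min_eq_right hge
      have hcond : ¬ (free ≠ [] ∧ idxf < (free.length : Int)) := by
        rw [hf, hmin]; intro h; omega
      rw [if_neg hcond]
      have hfreed : freed ≠ [] := by
        intro hnil
        rw [hnil] at hcap; simp at hcap; omega
      rw [if_pos hfreed]
      have hidx : c - free.length < freed.length := by omega
      have hel : PySem.List.pyGetD freed idxd 0 = freed[c - free.length]'hidx := by
        rw [hd, hmin, PySem.List.pyGetD_natCast, List.getD_eq_getElem _ _ hidx]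
      have harg1 : idxf = ((min (c + 1) free.length : Nat) : Int) := by
        rw [hf, hmin, Nat.min_eq_right (by omega)]
      have harg2 : idxd + 1 = (((c + 1) - min (c + 1) free.length : Nat) : Int) := by
        rw [hd, hmin, Nat.min_eq_right (by omega)]; omega
      have harg3 : ((m + 1 : Nat) : Int) - 1 = ((m : Nat) : Int) := by omega
      rw [hel, harg3, ih _ (c + 1) _ _ harg1 harg2 (by omega)
          (by rw [PySem.Dict.contains_insert]; simp)
          (PySem.Dict.nodup_keys_insert _ _ _ hnd)]
      rw [PySem.Dict.getD_insert_self, pv_insert_insert]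
      have hdrop : (free ++ freed).drop c = freed[c - free.length]'hidx :: (free ++ freed).drop (c + 1) := by
        have hlt2 : c < (free ++ freed).length := by simp; omega
        rw [← List.getElem_cons_drop hlt2]
        congr 1
        exact List.getElem_append_right hge
      rw [hdrop]
      simp only [List.take_succ_cons, List.append_assoc, List.singleton_append,
        Prod.mk.injEq, true_and]
      constructor <;> · congr 1; omega

-- canonical form of the growth phase --------------------------------------

def pvGrowCanon (pool : List Int) (bm0 : List (String × List Int)) :
    List (String × Int) → PySem.Dict String (List Int) → Nat → PySem.Dict String (List Int)
  | [], d, _ => d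
  | p :: rest, d, c =>
      pvGrowCanon pool bm0 rest
        (d.insert p.1 ((pvOrig bm0 p.1).take p.2.toNat ++ (pool.drop c).take (pvNeed bm0 p)))
        (c + pvNeed bm0 p)

theorem pv_growA_canon (free freed : List Int) (bm0 : List (String × List Int)) :
    ∀ (ts : List (String × Int)) (d : PySem.Dict String (List Int)) (c : Nat) (idxf idxd : Int),
    idxf = ((min c free.length : Nat) : Int) →
    idxd = ((c - min c free.length : Nat) : Int) →
    (ts.map Prod.fst).Nodup →
    (∀ p ∈ ts, d.contains p.1 = true ∧ d.getD p.1 [] = (pvOrig bm0 p.1).take p.2.toNat ∧ 0 ≤ p.2) →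
    d.keys.Nodup →
    c + (ts.map (pvNeed bm0)).sum ≤ free.length + freed.length →
    ts.foldl (fun (st : PySem.Dict String (List Int) × Int × Int) p =>
        pvGrowLoop free freed p.1 st.1 st.2.1 st.2.2 (p.2 - ((st.1.getD p.1 []).length : Int)))
      (d, idxf, idxd)
      = (pvGrowCanon (free ++ freed) bm0 ts d c,
         ((min (c + (ts.map (pvNeed bm0)).sum) free.length : Nat) : Int),
         ((c + (ts.map (pvNeed bm0)).sum - min (c + (ts.map (pvNeed bm0)).sum) free.length : Nat) : Int)) := by
  intro ts
  induction ts with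
  | nil =>
    intro d c idxf idxd hf hd _ _ _ _
    simp only [List.foldl_nil, pvGrowCanon, List.map_nil, List.sum_nil, Nat.add_zero]
    rw [hf, hd]
  | cons p rest ih =>
    intro d c idxf idxd hf hd hnd hv hk hcap
    simp only [List.map_cons, List.nodup_cons] at hnd
    obtain ⟨hc1, hd1, hp2⟩ := hv p (by simp)
    simp only [List.foldl_cons]
    have hneed : p.2 - ((d.getD p.1 []).length : Int) = ((pvNeed bm0 p : Nat) : Int) := by
      rw [hd1]
      unfold pvNeed
      have : ((pvOrig bm0 p.1).take p.2.toNat).length ≤ p.2.toNat := by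
        simp [List.length_take]
      omega
    rw [hneed, hf, hd, pv_growLoop_spec free freed p.1 (pvNeed bm0 p) d c _ _ rfl rfl
        (by simp only [List.map_cons, List.sum_cons] at hcap; omega) hc1 hk]
    rw [hd1]
    rw [ih (d.insert p.1 ((pvOrig bm0 p.1).take p.2.toNat ++
          ((free ++ freed).drop c).take (pvNeed bm0 p))) (c + pvNeed bm0 p) _ _ rfl rfl hnd.2 ?hv2
        (PySem.Dict.nodup_keys_insert _ _ _ hk)
        (by simp only [List.map_cons, List.sum_cons] at hcap; omega)]
    case hv2 =>
      intro q hq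
      obtain ⟨hq1, hq2, hq3⟩ := hv q (by simp [hq])
      have hne : q.1 ≠ p.1 := by
        intro h; exact hnd.1 (h ▸ List.mem_map.mpr ⟨q, hq, rfl⟩)
      refine ⟨?_, ?_, hq3⟩
      · rw [PySem.Dict.contains_insert]; simp [hq1]
      · rw [PySem.Dict.getD_insert_of_ne _ _ _ hne, hq2]
    show _ = (pvGrowCanon (free ++ freed) bm0 (p :: rest) d c, _, _)
    rw [pvGrowCanon]
    simp only [List.map_cons, List.sum_cons, Prod.mk.injEq, true_and]
    constructor <;> · congr 1; omega

-- the grow fold of B -------------------------------------------------------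

theorem pv_growB_canon (pool : List Int) (bm0 : List (String × List Int))
    (kept : PySem.Dict String (List Int)) :
    ∀ (ts : List (String × Int)) (d : PySem.Dict String (List Int)) (c : Nat) (rem : List Int),
    rem = pool.drop c →
    (∀ p ∈ ts, kept.getD p.1 [] = (pvOrig bm0 p.1).take p.2.toNat) →
    ts.foldl (fun (st : PySem.Dict String (List Int) × List Int) p =>
        (st.1.insert p.1 (kept.getD p.1 [] ++
            st.2.take (p.2 - ((kept.getD p.1 []).length : Int)).toNat),
         st.2.drop (p.2 - ((kept.getD p.1 []).length : Int)).toNat))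
      (d, rem)
      = (pvGrowCanon pool bm0 ts d c, pool.drop (c + (ts.map (pvNeed bm0)).sum)) := by
  intro ts
  induction ts with
  | nil => intro d c rem hrem _; simp [pvGrowCanon, hrem]
  | cons p rest ih =>
    intro d c rem hrem hv
    subst hrem
    simp only [List.foldl_cons]
    rw [hv p (by simp)]
    have hn : (p.2 - (((pvOrig bm0 p.1).take p.2.toNat).length : Int)).toNat = pvNeed bm0 p := rfl
    rw [hn, List.drop_drop]
    rw [ih _ (c + pvNeed bm0 p) _ rfl (fun q hq => hv q (by simp [hq]))]
    rw [pvGrowCanon]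
    simp only [List.map_cons, List.sum_cons, Prod.mk.injEq, true_and]
    congr 1
    omega

-- the shrink inserts are absorbed by the growth inserts --------------------

theorem pv_canon_absorb (pool : List Int) (bm0 : List (String × List Int))
    (f : String × Int → List Int) :
    ∀ (ts : List (String × Int)) (d : PySem.Dict String (List Int)) (c : Nat),
    (ts.map Prod.fst).Nodup → (∀ p ∈ ts, d.contains p.1 = true) →
    pvGrowCanon pool bm0 ts (ts.foldl (fun m p => m.insert p.1 (f p)) d) c
      = pvGrowCanon pool bm0 ts d c := by
  intro ts
  induction ts with
  | nil => intro d c _ _; rfl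
  | cons p rest ih =>
    intro d c hnd hc
    simp only [List.map_cons, List.nodup_cons] at hnd
    simp only [List.foldl_cons, pvGrowCanon]
    rw [pv_insert_foldl_comm f rest (d.insert p.1 (f p)) p.1 _ hnd.1
        (by rw [PySem.Dict.contains_insert]; simp)]
    rw [pv_insert_insert]
    rw [ih (d.insert p.1 ((pvOrig bm0 p.1).take p.2.toNat ++ (pool.drop c).take (pvNeed bm0 p)))
        (c + pvNeed bm0 p) hnd.2 ?_]
    intro q hq
    rw [PySem.Dict.contains_insert]
    simp [hc q (by simp [hq])]

-- the slice fold of B (kept prefixes + freed pool in one pass) -------------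

theorem pv_phaseB1 (bm0 : List (String × List Int)) (bmd : PySem.Dict String (List Int))
    (hbmd : bmd = PySem.Dict.mk bm0) :
    ∀ (ts : List (String × Int)) (k0 : PySem.Dict String (List Int)) (fl : List Int),
    (∀ p ∈ ts, 0 ≤ p.2) →
    ts.foldl (fun (st : PySem.Dict String (List Int) × List Int) p =>
        (st.1.insert p.1 (PySem.List.slice (bmd.getD p.1 []) none (some p.2)),
         st.2 ++ (PySem.List.slice (bmd.getD p.1 []) (some p.2) none).reverse))
      (k0, fl)
      = (ts.foldl (fun m p => m.insert p.1 ((pvOrig bm0 p.1).take p.2.toNat)) k0,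
         fl ++ ts.flatMap (fun p => ((pvOrig bm0 p.1).drop p.2.toNat).reverse)) := by
  intro ts
  induction ts with
  | nil => intro k0 fl _; simp
  | cons p rest ih =>
    intro k0 fl hv
    have hp2 := hv p (by simp)
    have hcur : bmd.getD p.1 [] = pvOrig bm0 p.1 := by rw [hbmd]; rfl
    simp only [List.foldl_cons]
    rw [hcur, PySem.List.slice_to _ hp2, PySem.List.slice_from _ hp2]
    rw [ih _ _ (fun q hq => hv q (by simp [hq]))]
    simp [List.flatMap_cons]


-- the arithmetic free-bucket count of Pre_ equals the length of the filtered range list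
theorem pv_freeLen_eq (bucket_map : List (String × List Int)) :
    ((((List.range 1000).map Int.ofNat).filter
        (fun x => !((bucket_map.flatMap Prod.snd).contains x))).length)
      = pvFreeLen bucket_map := by
  set flat : List Int := bucket_map.flatMap Prod.snd with hflat
  set R : List Int := (List.range 1000).map Int.ofNat with hRdef
  have hRn : R.Nodup := (List.nodup_range).map (fun a b h => Int.ofNat_inj.mp h)
  have hmemR : ∀ x : Int, x ∈ R ↔ (0 ≤ x ∧ x < 1000) := by
    intro x
    rw [hRdef]
    simp only [List.mem_map, List.mem_range]
    constructor
    · rintro ⟨n, hn, rfl⟩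
      rw [Int.ofNat_eq_natCast]
      constructor <;> omega
    · rintro ⟨h0, h1⟩
      exact ⟨x.toNat, by omega, by rw [Int.ofNat_eq_natCast]; omega⟩
  have hsplit : (R.filter (fun x => flat.contains x)).length
      + (R.filter (fun x => !(flat.contains x))).length = 1000 := by
    have h0 := (List.length_eq_length_filter_add (l := R) (fun x => flat.contains x)).symm
    simpa [hRdef] using h0
  have hperm : (R.filter (fun x => flat.contains x)).Perm
      ((PySem.List.dedup flat).filter (fun i => decide (0 ≤ i) && decide (i < 1000))) := by
    apply (List.perm_ext_iff_of_nodup (hRn.filter _) ((PySem.List.nodup_dedup flat).filter _)).mpr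
    intro x
    simp only [List.mem_filter, PySem.List.mem_dedup, hmemR, List.contains_eq_mem]
    constructor
    · rintro ⟨⟨h0, h1⟩, h2⟩
      exact ⟨by simpa using h2, by simp [h0, h1]⟩
    · rintro ⟨h2, h3⟩
      simp only [Bool.and_eq_true, decide_eq_true_eq] at h3
      exact ⟨⟨h3.1, h3.2⟩, by simpa using h2⟩
  unfold pvFreeLen
  rw [← hflat, ← hperm.length_eq]
  omega

-- assembling both ports ----------------------------------------------------

-- ===== VERDICT (by name: the statement is the Claim_ definition above) =====
theorem update_buckets_spec : Claim_equal_update_buckets := by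
  intro bucket_map target_size _hdom hpre
  obtain ⟨hbm, hts, hmem, hcap⟩ := hpre
  have hR : ((List.range 1000).map Int.ofNat).Nodup :=
    (List.nodup_range).map (fun a b h => Int.ofNat_inj.mp h)
  have hofR : PySem.Set.ofList ((List.range 1000).map Int.ofNat)
      = ((List.range 1000).map Int.ofNat) := by
    have h0 := pv_ofList_nodup ((List.range 1000).map Int.ofNat) [] (by simpa using hR)
    simpa [PySem.Set.ofList] using h0
  have hkeysmk : (PySem.Dict.mk bucket_map : PySem.Dict String (List Int)).keys.Nodup := by
    simpa [PySem.Dict.keys] using hbm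
  have hcont : ∀ p ∈ target_size,
      (PySem.Dict.mk bucket_map : PySem.Dict String (List Int)).contains p.1 = true := by
    intro p hp
    rcases List.mem_map.mp (hmem p hp).1 with ⟨q, hq, hq1⟩
    exact List.any_eq_true.mpr ⟨q, hq, by simp [hq1]⟩
  have horig : ∀ g, pvOrig bucket_map g
      = (Option.map (fun x => x.2) (bucket_map.find? (fun q => q.1 == g))).getD [] := by
    intro g; rfl
  have hfreeLen : ((((List.range 1000).map Int.ofNat).filter (fun x => !((bucket_map.flatMap Prod.snd).contains x))) : List Int).length = pvFreeLen bucket_map := pv_freeLen_eq bucket_map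
  have hfreedLen : ((target_size.flatMap (fun p => ((pvOrig bucket_map p.1).drop p.2.toNat).reverse)) : List Int).length
      = (target_size.map (pvFreedCnt bucket_map)).sum := by
    rw [List.length_flatMap]
    exact congrArg List.sum (List.map_congr_left (fun p _ => by simp [pvFreedCnt]))
  have hcap' : (target_size.map (pvNeed bucket_map)).sum
      ≤ ((((List.range 1000).map Int.ofNat).filter (fun x => !((bucket_map.flatMap Prod.snd).contains x))) : List Int).length + ((target_size.flatMap (fun p => ((pvOrig bucket_map p.1).drop p.2.toNat).reverse)) : List Int).length := by
    rw [hfreeLen, hfreedLen]; exact hcap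
  have hkeptval : ∀ p ∈ target_size,
      (target_size.foldl (fun m p => m.insert p.1 ((pvOrig bucket_map p.1).take p.2.toNat))
        (PySem.Dict.mk bucket_map)).getD p.1 []
      = (pvOrig bucket_map p.1).take p.2.toNat := by
    intro p hp
    rw [pv_foldl_insert_getD _ target_size _ p.1 [] hts, pv_find?_key target_size hts hp]
  -- ===== A reduced to the canonical form =====
  have hA : update_buckets bucket_map target_size
      = (pvGrowCanon ((((List.range 1000).map Int.ofNat).filter (fun x => !((bucket_map.flatMap Prod.snd).contains x))) ++ (target_size.flatMap (fun p => ((pvOrig bucket_map p.1).drop p.2.toNat).reverse))) bucket_map target_size (PySem.Dict.mk bucket_map) 0).items := by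
    simp only [update_buckets]
    rw [pv_phase1, hofR]
    dsimp only
    rw [pv_shrink_spec bucket_map target_size _ _ [] hts ?hsh]
    case hsh =>
      intro p hp
      refine ⟨rfl, ?_, (hmem p hp).2⟩
      rw [pv_foldl_insert_getD (fun p => ((p.2).length : Int)) bucket_map _ p.1 0 hbm]
      rw [horig p.1]
      cases bucket_map.find? (fun q => q.1 == p.1) <;> simp
    dsimp only
    rw [List.nil_append]
    rw [pv_growA_canon (((List.range 1000).map Int.ofNat).filter (fun x => !((bucket_map.flatMap Prod.snd).contains x))) (target_size.flatMap (fun p => ((pvOrig bucket_map p.1).drop p.2.toNat).reverse)) bucket_map target_size _ 0 0 0 (by simp) (by simp) hts ?hgr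
        (pv_nodup_keys_foldl _ target_size _ hkeysmk) (by simpa using hcap')]
    case hgr =>
      intro p hp
      exact ⟨pv_contains_foldl _ target_size _ p.1 (hcont p hp),
        hkeptval p hp, (hmem p hp).2⟩
    dsimp only
    rw [pv_canon_absorb ((((List.range 1000).map Int.ofNat).filter (fun x => !((bucket_map.flatMap Prod.snd).contains x))) ++ (target_size.flatMap (fun p => ((pvOrig bucket_map p.1).drop p.2.toNat).reverse))) bucket_map _ target_size
        (PySem.Dict.mk bucket_map) 0 hts hcont]
  -- ===== B reduced to the canonical form =====
  have hB : update_buckets_alt bucket_map target_size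
      = (pvGrowCanon ((((List.range 1000).map Int.ofNat).filter (fun x => !((bucket_map.flatMap Prod.snd).contains x))) ++ (target_size.flatMap (fun p => ((pvOrig bucket_map p.1).drop p.2.toNat).reverse))) bucket_map target_size (PySem.Dict.mk bucket_map) 0).items := by
    simp only [update_buckets_alt]
    rw [PySem.List.foldl_append_eq_flatMap, List.nil_append]
    have hfreeB : (((List.range 1000).map Int.ofNat).filter
        (fun i => !(PySem.Set.contains (PySem.Set.ofList (bucket_map.flatMap (fun p => p.2))) i)))
        = (((List.range 1000).map Int.ofNat).filter (fun x => !((bucket_map.flatMap Prod.snd).contains x))) := by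
      apply List.filter_congr
      intro x _
      simp only [PySem.Set.contains]
      rw [pv_contains_ofList]
    rw [hfreeB]
    rw [pv_phaseB1 bucket_map _ rfl target_size _ [] (fun p hp => (hmem p hp).2)]
    dsimp only
    rw [List.nil_append]
    rw [pv_growB_canon ((((List.range 1000).map Int.ofNat).filter (fun x => !((bucket_map.flatMap Prod.snd).contains x))) ++ (target_size.flatMap (fun p => ((pvOrig bucket_map p.1).drop p.2.toNat).reverse))) bucket_map _ target_size _ 0 _ (by simp) ?hkb]
    case hkb =>
      intro p hp
      rw [pv_foldl_insert_getD _ target_size _ p.1 [] hts, pv_find?_key target_size hts hp]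
  rw [Spec_update_buckets, hA, hB]
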